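-- pv_equiv track=rewrite | github.com/open-assistants-lab/executive-assistant | src/skills/models.py | _is_valid_skill_name
-- ===== SOURCE A (Python) =====
-- def _is_valid_skill_name(name: str) -> bool:
--     """Validate skill name format.
--
--     Must be 1-64 characters, lowercase letters and hyphens only,
--     cannot start or end with hyphen, no consecutive hyphens.
--     """
--     if not name or len(name) > 64:
--         return False
--     if name[0] == "-" or name[-1] == "-":
--         return False
--     if "--" in name:
--         return False
--     return all(c.islower() or c.isdigit() or c == "-" for c in name)
-- ===== SOURCE B (Python) =====
-- def _is_valid_skill_name(name: str) -> bool: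
--     """Validate skill name format in one pass over the string."""
--     if not name or len(name) > 64:
--         return False
--     prev = None
--     last = len(name) - 1
--     for i, c in enumerate(name):
--         if not (c.islower() or c.isdigit() or c == "-"):
--             return False
--         if c == "-" and (i == 0 or i == last or prev == "-"):
--             return False
--         prev = c
--     return True
-- ===== Notes on version B (the rewrite author's own statement) =====
-- stated objective: alternative
-- what changed: B replaces A's four separate scans (truthiness/len guard, endpoint checks, double-hyphen substring search, all() character scan) by a single traversal that keeps the previous character and the last index.
import Mathlib
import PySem

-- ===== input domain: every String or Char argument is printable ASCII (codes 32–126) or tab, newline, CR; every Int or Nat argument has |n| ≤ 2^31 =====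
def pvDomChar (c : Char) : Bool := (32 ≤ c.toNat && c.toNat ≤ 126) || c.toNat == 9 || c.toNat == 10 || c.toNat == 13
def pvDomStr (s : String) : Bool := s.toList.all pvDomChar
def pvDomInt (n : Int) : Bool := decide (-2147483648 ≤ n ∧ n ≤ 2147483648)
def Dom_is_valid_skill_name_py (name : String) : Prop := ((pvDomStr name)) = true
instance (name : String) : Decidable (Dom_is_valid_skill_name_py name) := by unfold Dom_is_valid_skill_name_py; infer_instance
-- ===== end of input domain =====

-- B validates the skill name in one pass keeping the previous character, instead of A's
-- separate endpoint checks, '--' substring scan and all() scan (alternative decomposition).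


-- ===== PORT A =====
def is_valid_skill_name_py (name : String) : Bool :=
  if name.toList = [] ∨ PySem.Str.len name > 64 then false
  else if PySem.Str.pyGet? name 0 = some '-' ∨ PySem.Str.pyGet? name (-1) = some '-' then false
  else if PySem.Str.isIn "--" name = true then false
  else name.toList.all (fun c => PySem.Chars.islower c || PySem.Chars.isdigit c || c == '-')

-- ===== PORT B =====
-- the 'for i, c in enumerate(name)' loop of Source B, carrying prev and the last index
def altLoop (last i : Nat) (prev : Option Char) : List Char → Bool
  | [] => true
  | c :: rest =>
    if !(PySem.Chars.islower c || PySem.Chars.isdigit c || c == '-') then false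
    else if c == '-' && (i == 0 || i == last || prev == some '-') then false
    else altLoop last (i + 1) (some c) rest

def is_valid_skill_name_py_alt (name : String) : Bool :=
  if name.toList = [] ∨ PySem.Str.len name > 64 then false
  else altLoop (name.toList.length - 1) 0 none name.toList

-- ===== PRECONDITION & SPEC =====
def Spec_is_valid_skill_name_py (name : String) (out : Bool) : Prop := out = is_valid_skill_name_py_alt name
instance (name : String) (out : Bool) : Decidable (Spec_is_valid_skill_name_py name out) := by unfold Spec_is_valid_skill_name_py; infer_instance

-- ===== CLAIM (what is proved, stated in full; the proofs are below) =====
def Claim_equal_is_valid_skill_name_py : Prop := ∀ (name : String), Dom_is_valid_skill_name_py name → Spec_is_valid_skill_name_py name (is_valid_skill_name_py name)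

-- ===== LEMMAS AND PROOFS =====

-- proof-side helpers
def pvOk (c : Char) : Bool := PySem.Chars.islower c || PySem.Chars.isdigit c || c == '-'

def pvAdj : List Char → Bool
  | c1 :: c2 :: t => (c1 == '-' && c2 == '-') || pvAdj (c2 :: t)
  | _ => false

lemma pvAdj_iff_infix (l : List Char) : pvAdj l = true ↔ ['-', '-'] <:+: l := by
  induction l with
  | nil => simp [pvAdj]
  | cons c t ih =>
    cases t with
    | nil =>
      simp only [pvAdj]
      constructor
      · intro h; simp at h
      · intro h; have := h.length_le; simp at this
    | cons c2 t2 =>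
      rw [List.infix_cons_iff, List.cons_prefix_cons, List.cons_prefix_cons]
      simp only [pvAdj, Bool.or_eq_true, Bool.and_eq_true, beq_iff_eq, ih]
      simp [List.nil_prefix]
      tauto

lemma altLoop_char (l : List Char) : ∀ (i : Nat) (c : Char) (last : Nat),
    i + l.length = last + 1 → 0 < i → (c = '-' → l ≠ []) →
    altLoop last i (some c) l =
      (l.all pvOk && !pvAdj (c :: l) && (l.getLastD c != '-')) := by
  induction l with
  | nil =>
    intro i c last _ _ h3
    have hc : c ≠ '-' := fun h => (h3 h) rfl
    simp [altLoop, pvAdj, List.getLastD, hc]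
  | cons d rest ih =>
    intro i c last hlen hi h3
    have hlen' : i + rest.length = last := by simp at hlen; omega
    have h0 : (i == 0) = false := by simp; omega
    have hlast : (i == last) = decide (rest = []) := by
      cases rest with
      | nil => simp at hlen' ⊢; omega
      | cons r rs => simp at hlen' ⊢; omega
    show (if !(pvOk d) then false
          else if d == '-' && (i == 0 || i == last || (some c : Option Char) == some '-') then false
          else altLoop last (i + 1) (some d) rest)
        = ((d :: rest).all pvOk && !pvAdj (c :: d :: rest) && ((d :: rest).getLastD c != '-'))
    rw [h0, hlast]
    by_cases hp : pvOk d = true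
    · rw [hp]
      by_cases hd : d = '-'
      · subst hd
        by_cases hr : rest = []
        · subst hr
          simp [pvAdj, List.getLastD]
        · have hrne : (decide (rest = [])) = false := by simp [hr]
          rw [hrne]
          by_cases hc : c = '-'
          · subst hc
            simp [pvAdj]
          · have := ih (i + 1) '-' last (by simp at hlen ⊢; omega) (by omega) (fun _ => hr)
            have hcb : (c == '-') = false := by simp [hc]
            simp only [pvAdj, List.all_cons, List.getLastD_cons, hp]
            simp [hcb, this]
      · have := ih (i + 1) d last (by simp at hlen ⊢; omega) (by omega) (fun h => absurd h hd)
        have hdb : (d == '-') = false := by simp [hd]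
        simp only [pvAdj, List.all_cons, List.getLastD_cons, hp]
        simp [hdb, this]
    · simp only [Bool.not_eq_true] at hp
      simp [hp, pvAdj]

lemma altLoop_top (c : Char) (t : List Char) :
    altLoop ((c :: t).length - 1) 0 none (c :: t) =
      (!((c :: t).getLast? == some '-') && !(c == '-') && !pvAdj (c :: t)
        && (c :: t).all pvOk) := by
  have hl : (c :: t).getLast? = some (t.getLastD c) := by
    rw [List.getLast?_cons, List.getLastD_eq_getLast?]
  show (if !(pvOk c) then false
        else if c == '-' && ((0 : Nat) == 0 || (0 : Nat) == (c :: t).length - 1 || (none : Option Char) == some '-') then false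
        else altLoop ((c :: t).length - 1) 1 (some c) t)
      = _
  by_cases hp : pvOk c = true
  · rw [hp]
    by_cases hc : c = '-'
    · subst hc
      simp [hl]
    · have := altLoop_char t 1 c t.length (by omega) (by omega) (fun h => absurd h hc)
      simp only [List.length_cons, Nat.add_sub_cancel] at *
      simp only [hl, List.all_cons, hp]
      have hcb : (c == '-') = false := by simp [hc]
      rw [this, hcb]
      cases t.all pvOk <;> cases pvAdj (c :: t) <;> cases hgl : (t.getLastD c == '-') <;>
        simp_all [bne]
  · simp only [Bool.not_eq_true] at hp
    simp [hp]

-- ===== VERDICT (by name: the statement is the Claim_ definition above) =====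
theorem is_valid_skill_name_py_spec : Claim_equal_is_valid_skill_name_py := by
  intro name _
  unfold Spec_is_valid_skill_name_py is_valid_skill_name_py is_valid_skill_name_py_alt
  by_cases hg : name.toList = [] ∨ PySem.Str.len name > 64
  · rw [if_pos hg, if_pos hg]
  · rw [if_neg hg, if_neg hg]
    have hne : name.toList ≠ [] := fun h => hg (Or.inl h)
    obtain ⟨c, t, hct⟩ := List.exists_cons_of_ne_nil hne
    have h0 : PySem.Str.pyGet? name 0 = some c := by
      simp [PySem.Str.pyGet?_eq, hct]
    have hm1 : PySem.Str.pyGet? name (-1) = (c :: t).getLast? := by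
      simp [PySem.Str.pyGet?_eq, hct, PySem.List.pyGet?_neg_one]
    have hin : PySem.Str.isIn "--" name = pvAdj (c :: t) := by
      rw [Bool.eq_iff_iff, PySem.Str.isIn_iff_infix, pvAdj_iff_infix, hct]
      have hdd : ("--" : String).toList = ['-', '-'] := by decide
      rw [hdd]
    rw [hct, altLoop_top, h0, hm1, hin]
    by_cases hA : some c = some '-' ∨ (c :: t).getLast? = some '-'
    · rw [if_pos hA]
      rcases hA with h | h
      · simp at h; simp [h]
      · simp [h]
    · rw [if_neg hA]
      rw [not_or] at hA
      obtain ⟨hc, hl⟩ := hA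
      have hc' : c ≠ '-' := fun h => hc (by rw [h])
      by_cases hI : pvAdj (c :: t) = true
      · rw [if_pos hI]
        simp [hI]
      · rw [if_neg hI]
        simp only [Bool.not_eq_true] at hI
        have hb1 : ((c :: t).getLast? == some '-') = false := by simp [hl]
        have hb2 : (c == '-') = false := by simp [hc']
        simp only [hI, hb1, hb2, List.all_cons, Bool.not_false, Bool.true_and, Bool.and_true,
          show pvOk c = (PySem.Chars.islower c || PySem.Chars.isdigit c || c == '-') from rfl,
          show t.all pvOk = t.all (fun c => PySem.Chars.islower c || PySem.Chars.isdigit c || c == '-') from rfl]
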